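-- pv_equiv track=rewrite | github.com/AlgorithmReview-Organization-2/CodingReviewRepository | Coding_1228 Array_And_Hashing_And_Stack/주제무/최원준/2.py | solution
-- ===== SOURCE A (Python) =====
-- from collections import defaultdict
--
-- def solution(id_list, reports, k):
--     reported_users = defaultdict(set)
--     for report in reports:
--         reporter, reported = report.split(" ")
--         reported_users[reported].add(reporter)
--
--     alarm_user = defaultdict(int)
--     for key, value in reported_users.items():
--         if len(value) >= k:
--             for user in value:
--                 alarm_user[user] += 1
--
--     for i in range(len(id_list)):
--         id_list[i] = alarm_user[id_list[i]]
--     return id_list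
-- ===== SOURCE B (Python) =====
-- def solution(id_list, reports, k):
--     # dedup whole report pairs once, then two flat passes over a count table
--     pairs = list(dict.fromkeys(tuple(r.split(" ")) for r in reports))
--     cnt = {}
--     for _, reported in pairs:
--         cnt[reported] = cnt.get(reported, 0) + 1
--     alarm = {}
--     for reporter, reported in pairs:
--         if cnt[reported] >= k:
--             alarm[reporter] = alarm.get(reporter, 0) + 1
--     for i in range(len(id_list)):
--         id_list[i] = alarm.get(id_list[i], 0)
--     return id_list
-- ===== Notes on version B (the rewrite author's own statement) =====
-- stated objective: alternative
-- what changed: A groups reporters into per-reported-user sets and runs a nested loop over those sets; B instead dedups whole report pairs once, builds a flat count table of distinct reporters per reported user, and makes a second flat pass over the deduped pairs crediting reporters, with no set-of-reporters structure and no nested loop.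
import Mathlib
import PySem

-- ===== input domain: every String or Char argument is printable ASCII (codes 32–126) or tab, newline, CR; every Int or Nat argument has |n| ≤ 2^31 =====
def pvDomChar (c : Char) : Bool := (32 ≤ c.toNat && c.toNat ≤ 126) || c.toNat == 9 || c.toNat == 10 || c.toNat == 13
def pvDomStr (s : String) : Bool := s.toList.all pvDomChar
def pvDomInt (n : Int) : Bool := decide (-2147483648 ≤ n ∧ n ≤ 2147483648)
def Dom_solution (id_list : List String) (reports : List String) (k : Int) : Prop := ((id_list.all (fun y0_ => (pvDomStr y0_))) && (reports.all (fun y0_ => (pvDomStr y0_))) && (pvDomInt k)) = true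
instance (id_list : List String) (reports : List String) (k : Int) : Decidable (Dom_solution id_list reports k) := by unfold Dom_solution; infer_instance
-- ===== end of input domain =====

-- B replaces A's per-user sets and nested crediting loop by a dedup of whole report
-- pairs plus two flat passes over a count table (objective: alternative decomposition).
-- Both Pythons overwrite id_list in place; the equivalence proved here is about the
-- returned list of ints (B performs the same in-place overwrite).

-- shared step both Pythons perform: report.split(" ") into (reporter, reported);
-- the ("","") default is only reached outside Pre_solution (Python raises there)
def pvPair (s : String) : String × String :=
  match (PySem.Str.split? s " ").getD [] with
  | [a, b] => (a, b)
  | _ => ("", "")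

-- ===== PORT A =====
def solution (id_list : List String) (reports : List String) (k : Int) : List Int :=
  let reported_users : PySem.Dict String (PySem.Set String) :=
    reports.foldl (fun d rep =>
      d.modify (pvPair rep).2 PySem.Set.empty (fun s => PySem.Set.add s (pvPair rep).1))
      PySem.Dict.empty
  let alarm_user : PySem.Dict String Int :=
    reported_users.items.foldl (fun a kv =>
      if k ≤ (kv.2.length : Int) then
        kv.2.foldl (fun a u => a.modify u 0 (· + 1)) a
      else a) PySem.Dict.empty
  id_list.map (fun u => alarm_user.getD u 0)

-- ===== PORT B =====
def solution_alt (id_list : List String) (reports : List String) (k : Int) : List Int :=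
  let pairs : List (String × String) := PySem.List.dedup (reports.map pvPair)
  let cnt : PySem.Dict String Int :=
    pairs.foldl (fun d p => d.insert p.2 (d.getD p.2 0 + 1)) PySem.Dict.empty
  let alarm : PySem.Dict String Int :=
    pairs.foldl (fun d p =>
      if k ≤ cnt.getD p.2 0 then d.insert p.1 (d.getD p.1 0 + 1) else d) PySem.Dict.empty
  id_list.map (fun u => alarm.getD u 0)

-- ===== PRECONDITION & SPEC =====
-- Pre_ excludes exactly the reports that do not split on " " into two parts:
-- there both Pythons raise ValueError (tuple unpacking).
def Pre_solution (id_list : List String) (reports : List String) (k : Int) : Prop :=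
  ∀ s ∈ reports, ((PySem.Str.split? s " ").getD []).length = 2
instance (id_list : List String) (reports : List String) (k : Int) : Decidable (Pre_solution id_list reports k) := by unfold Pre_solution; infer_instance
def pvWitness_solution : List String × List String × Int :=
  (["mu", "frodo", "apeach"], ["mu frodo", "apeach frodo", "frodo mu"], 2)

def Spec_solution (id_list : List String) (reports : List String) (k : Int) (out : List Int) : Prop := out = solution_alt id_list reports k
instance (id_list : List String) (reports : List String) (k : Int) (out : List Int) : Decidable (Spec_solution id_list reports k out) := by unfold Spec_solution; infer_instance

-- ===== CLAIM (what is proved, stated in full; the proofs are below) =====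
def Claim_equal_solution : Prop := ∀ (id_list : List String) (reports : List String) (k : Int), Dom_solution id_list reports k → Pre_solution id_list reports k → Spec_solution id_list reports k (solution id_list reports k)

-- ===== LEMMAS AND PROOFS =====

-- A's grouping loop: the set stored under r collects, in order, the reporters of r
theorem pv_group_getD (l : List (String × String)) (d : PySem.Dict String (PySem.Set String)) (r : String) :
    (l.foldl (fun d p => d.modify p.2 PySem.Set.empty (fun s => PySem.Set.add s p.1)) d).getD r PySem.Set.empty
      = PySem.Set.update (d.getD r PySem.Set.empty) ((l.filter (fun p => p.2 == r)).map (·.1)) := by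
  induction l generalizing d with
  | nil => simp [PySem.Set.update]
  | cons p l ih =>
    simp only [List.foldl_cons, ih, List.filter_cons]
    by_cases h : p.2 = r
    · subst h
      rw [PySem.Dict.getD_modify_self]
      simp [PySem.Set.update_cons]
    · rw [PySem.Dict.getD_modify_of_ne _ _ _ (by exact fun hh => h hh.symm)]
      simp [beq_iff_eq, h]

-- A's crediting loop, fold characterisation
theorem pv_credit_getD (k : Int) (items : List (String × PySem.Set String))
    (a : PySem.Dict String Int) (u : String) :
    (items.foldl (fun a kv =>
        if k ≤ (kv.2.length : Int) then kv.2.foldl (fun a u => a.modify u 0 (· + 1)) a else a) a).getD u 0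
      = a.getD u 0 +
        (items.map (fun kv => if k ≤ (kv.2.length : Int) then ((kv.2.count u : Nat) : Int) else 0)).sum := by
  induction items generalizing a with
  | nil => simp
  | cons kv items ih =>
    simp only [List.foldl_cons, List.map_cons, List.sum_cons, ih]
    by_cases h : k ≤ (kv.2.length : Int)
    · simp only [h, if_true, PySem.Dict.getD_foldl_modify_add_one]
      ring
    · simp only [h, if_false]; ring

-- B's crediting loop, fold characterisation
theorem pv_flat_getD (k : Int) (cnt : PySem.Dict String Int) (l : List (String × String))
    (d : PySem.Dict String Int) (u : String) :
    (l.foldl (fun d p => if k ≤ cnt.getD p.2 0 then d.insert p.1 (d.getD p.1 0 + 1) else d) d).getD u 0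
      = d.getD u 0 + ((l.countP (fun p => decide (k ≤ cnt.getD p.2 0) && (p.1 == u)) : Nat) : Int) := by
  induction l generalizing d with
  | nil => simp
  | cons p l ih =>
    simp only [List.foldl_cons, List.countP_cons]
    by_cases hc : k ≤ cnt.getD p.2 0
    · simp only [hc, if_true, ih, decide_true, Bool.true_and]
      by_cases hu : p.1 = u
      · subst hu; rw [PySem.Dict.getD_insert_self]; simp; ring
      · rw [PySem.Dict.getD_insert_of_ne _ _ _ (fun hh => hu hh.symm)]
        simp [hu]
    · simp [hc, ih]

-- counting by partition over a nodup list of keys covering all second components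
theorem pv_countP_partition (R : List String) (P : List (String × String)) (q : String × String → Bool)
    (hnd : R.Nodup) (hcov : ∀ p ∈ P, p.2 ∈ R) :
    (R.map (fun r => P.countP (fun p => p.2 == r && q p))).sum = P.countP q := by
  induction R generalizing P with
  | nil =>
    have : P = [] := List.eq_nil_iff_forall_not_mem.mpr (fun p hp => by simpa using hcov p hp)
    simp [this]
  | cons r R ih =>
    simp only [List.map_cons, List.sum_cons]
    have hstep : ∀ r' ∈ R, P.countP (fun p => p.2 == r' && q p)
        = (P.filter (fun p => !(p.2 == r))).countP (fun p => p.2 == r' && q p) := by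
      intro r' hr'
      have hne : r' ≠ r := fun h => (List.nodup_cons.mp hnd).1 (h ▸ hr')
      rw [List.countP_filter]
      apply List.countP_congr
      intro p _
      simp only [Bool.and_eq_true, beq_iff_eq, Bool.not_eq_eq_eq_not, Bool.not_true, beq_eq_false_iff_ne]
      constructor
      · rintro ⟨h2, hq⟩
        exact ⟨⟨h2, hq⟩, h2 ▸ hne⟩
      · rintro ⟨⟨h2, hq⟩, _⟩
        exact ⟨h2, hq⟩
    rw [List.map_congr_left hstep]
    rw [ih (P.filter (fun p => !(p.2 == r))) (List.nodup_cons.mp hnd).2 ?cov]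
    case cov =>
      intro p hp
      have h1 := List.of_mem_filter hp
      have h2 := List.mem_of_mem_filter hp
      have := hcov p h2
      simp only [List.mem_cons] at this
      rcases this with h | h
      · simp [h] at h1
      · exact h
    rw [List.countP_filter]
    rw [List.countP_eq_countP_filter_add P q (fun p => p.2 == r), List.countP_filter, List.countP_filter]
    congr 1
    all_goals apply List.countP_congr; intro p _; simp [Bool.and_comm]

-- A's set of reporters of r is a permutation of the reporters of r among B's deduped pairs
theorem pv_set_perm (L : List (String × String)) (r : String) :
    (PySem.Set.ofList ((L.filter (fun p => p.2 == r)).map (·.1))).Perm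
      (((PySem.List.dedup L).filter (fun p => p.2 == r)).map (·.1)) := by
  rw [PySem.List.dedup_eq_ofList]
  have hnd : ((((PySem.Set.ofList L).filter (fun p => p.2 == r)).map (·.1)) : List String).Nodup := by
    apply List.Nodup.map_on
    · intro x hx y hy hxy
      have hx2 : x.2 = r := by simpa using (List.of_mem_filter hx)
      have hy2 : y.2 = r := by simpa using (List.of_mem_filter hy)
      exact Prod.ext hxy (hx2.trans hy2.symm)
    · exact (PySem.Set.nodup_ofList L).filter _
  refine (List.perm_ext_iff_of_nodup (PySem.Set.nodup_ofList _) hnd).mpr ?_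
  intro a
  simp [PySem.Set.mem_ofList]

-- pointwise agreement of the two alarm values
theorem pv_value_eq (reports : List String) (k : Int) (u : String) :
    (let reported_users : PySem.Dict String (PySem.Set String) :=
        reports.foldl (fun d rep =>
          d.modify (pvPair rep).2 PySem.Set.empty (fun s => PySem.Set.add s (pvPair rep).1))
          PySem.Dict.empty
      let alarm_user : PySem.Dict String Int :=
        reported_users.items.foldl (fun a kv =>
          if k ≤ (kv.2.length : Int) then kv.2.foldl (fun a u => a.modify u 0 (· + 1)) a else a)
          PySem.Dict.empty
      alarm_user.getD u 0)
    = (let pairs := PySem.List.dedup (reports.map pvPair)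
       let cnt : PySem.Dict String Int :=
         pairs.foldl (fun d p => d.insert p.2 (d.getD p.2 0 + 1)) PySem.Dict.empty
       let alarm : PySem.Dict String Int :=
         pairs.foldl (fun d p =>
           if k ≤ cnt.getD p.2 0 then d.insert p.1 (d.getD p.1 0 + 1) else d) PySem.Dict.empty
       alarm.getD u 0) := by
  simp only []
  set L : List (String × String) := reports.map pvPair with hL
  set P : List (String × String) := PySem.List.dedup L with hP
  set R : List String := PySem.Set.ofList (L.map (·.2)) with hR
  set S : String → PySem.Set String :=
    fun r => PySem.Set.ofList ((L.filter (fun p => p.2 == r)).map (·.1)) with hS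
  -- A side: the grouping dict
  have hfold : (reports.foldl (fun d rep =>
          d.modify (pvPair rep).2 PySem.Set.empty (fun s => PySem.Set.add s (pvPair rep).1))
          PySem.Dict.empty)
      = L.foldl (fun d p => d.modify p.2 PySem.Set.empty (fun s => PySem.Set.add s p.1))
          PySem.Dict.empty := by
    rw [hL, List.foldl_map]
  rw [hfold]
  have hkeys : (L.foldl (fun d p => d.modify p.2 PySem.Set.empty (fun s => PySem.Set.add s p.1))
      PySem.Dict.empty).keys = R := by
    rw [PySem.Dict.keys_foldl_modify_key L (fun p => p.2) PySem.Set.empty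
      (fun _ p => (fun s => PySem.Set.add s p.1)) PySem.Dict.empty]
    rw [PySem.Dict.keys_empty, PySem.Set.update_nil_left, hR]
  have hndk : (L.foldl (fun d p => d.modify p.2 PySem.Set.empty (fun s => PySem.Set.add s p.1))
      PySem.Dict.empty).keys.Nodup := by
    rw [hkeys, hR]; exact PySem.Set.nodup_ofList _
  have hgetD : ∀ r, (L.foldl (fun d p => d.modify p.2 PySem.Set.empty (fun s => PySem.Set.add s p.1))
      PySem.Dict.empty).getD r PySem.Set.empty = S r := by
    intro r
    rw [pv_group_getD, PySem.Dict.getD_empty]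
    show PySem.Set.update [] _ = _
    rw [PySem.Set.update_nil_left, hS]
  have hitems : (L.foldl (fun d p => d.modify p.2 PySem.Set.empty (fun s => PySem.Set.add s p.1))
      PySem.Dict.empty).items = R.map (fun r => (r, S r)) := by
    rw [PySem.Dict.items_eq_map_keys _ hndk PySem.Set.empty, hkeys]
    exact List.map_congr_left (fun r _ => by rw [hgetD r])
  rw [hitems, pv_credit_getD, PySem.Dict.getD_empty, List.map_map]
  -- B side
  have hcnt : ∀ r, (P.foldl (fun d p => d.insert p.2 (d.getD p.2 0 + 1))
      PySem.Dict.empty).getD r 0 = ((P.countP (fun p => p.2 == r) : Nat) : Int) := by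
    intro r
    have h := PySem.Dict.getD_foldl_insert_add_one (P.map (·.2)) PySem.Dict.empty r
    rw [List.foldl_map] at h
    rw [h, PySem.Dict.getD_empty, List.count_eq_countP, List.countP_map]
    simp [Function.comp_def]
  rw [pv_flat_getD, PySem.Dict.getD_empty, zero_add, zero_add]
  -- replace cnt lookups inside the count
  have hq : P.countP (fun p => decide (k ≤ ((P.foldl (fun d p => d.insert p.2 (d.getD p.2 0 + 1))
        PySem.Dict.empty).getD p.2 0)) && (p.1 == u))
      = P.countP (fun p => decide (k ≤ ((P.countP (fun p' => p'.2 == p.2) : Nat) : Int)) && (p.1 == u)) := by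
    apply List.countP_congr
    intro p _
    rw [hcnt p.2]
  rw [hq]
  -- partition the right-hand count over R
  rw [← pv_countP_partition R P _ (by rw [hR]; exact PySem.Set.nodup_ofList _) ?cov]
  case cov =>
    intro p hp
    rw [hR]
    rw [PySem.Set.mem_ofList]
    rw [hP, PySem.List.dedup_eq_ofList, PySem.Set.mem_ofList] at hp
    exact List.mem_map_of_mem hp
  -- cast the Int sum to a Nat sum
  rw [show (R.map (fun r => ((P.countP (fun p => p.2 == r &&
        (decide (k ≤ ((P.countP (fun p' => p'.2 == p.2) : Nat) : Int)) && (p.1 == u)))) : Nat))).sum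
      = (R.map (fun r => P.countP (fun p => p.2 == r &&
        (decide (k ≤ ((P.countP (fun p' => p'.2 == p.2) : Nat) : Int)) && (p.1 == u))))).sum from rfl]
  rw [Nat.cast_list_sum, List.map_map]
  -- termwise equality
  apply congrArg List.sum
  apply List.map_congr_left
  intro r _
  simp only [Function.comp]
  -- facts about S r via the permutation
  have hperm := pv_set_perm L r
  rw [← hP] at hperm
  have hlen : (S r).length = P.countP (fun p => p.2 == r) := by
    rw [hS]
    rw [hperm.length_eq, List.length_map, ← List.countP_eq_length_filter]
  have hcount : (S r).count u = P.countP (fun p => (p.1 == u) && (p.2 == r)) := by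
    rw [hS, hperm.count_eq, List.count_eq_countP, List.countP_map, List.countP_filter]
    apply List.countP_congr; intro p _; simp [Function.comp]
  by_cases hk : k ≤ ((P.countP (fun p => p.2 == r) : Nat) : Int)
  · rw [if_pos (by rw [hlen]; exact hk)]
    rw [hcount]
    congr 1
    apply List.countP_congr
    intro p _
    simp only [Bool.and_eq_true, beq_iff_eq, decide_eq_true_eq]
    constructor
    · rintro ⟨h1, h2⟩
      exact ⟨h2, by rw [h2]; exact hk, h1⟩
    · rintro ⟨h2, ⟨_, h1⟩⟩; exact ⟨h1, h2⟩
  · rw [if_neg (by rw [hlen]; exact hk)]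
    symm
    rw [Nat.cast_eq_zero, List.countP_eq_zero]
    intro p hp hcontra
    simp only [Bool.and_eq_true, beq_iff_eq, decide_eq_true_eq] at hcontra
    refine hk ?_
    have h2 := hcontra.1
    have hk' := hcontra.2.1
    rw [h2] at hk'
    exact hk'

-- ===== VERDICT (by name: the statement is the Claim_ definition above) =====
theorem solution_spec : Claim_equal_solution := by
  intro id_list reports k _ _
  show solution id_list reports k = solution_alt id_list reports k
  simp only [solution, solution_alt]
  exact List.map_congr_left (fun u _ => pv_value_eq reports k u)
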